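-- pv_equiv track=rewrite | github.com/dengshilong/C100Problem | chapter1/pleateau.py | pleateaub
-- ===== SOURCE A (Python) =====
-- def pleateaub(nums):
--     length = 1
--     i = 0
--     while i + length < len(nums):
--         if nums[i] == nums[i + length]:
--             length += 1
--         else:
--             i += length
--             while 0 < i < len(nums) and nums[i] == nums[i - 1]:
--                 i -= 1
--     return length
-- ===== SOURCE B (Python) =====
-- def pleateaub(nums):
--     n = len(nums)
--     if n == 0:
--         return 1
--     # precompute run boundaries once
--     run_start = [0] * n
--     for p in range(1, n):
--         run_start[p] = p if nums[p] != nums[p - 1] else run_start[p - 1]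
--     run_end = [n] * n
--     for p in range(n - 2, -1, -1):
--         run_end[p] = p + 1 if nums[p + 1] != nums[p] else run_end[p + 1]
--     i, l = 0, 1
--     while i + l < n:
--         j = i + l
--         if nums[j] == nums[i]:
--             l += run_end[j] - j
--             j = run_end[j]
--             if j >= n:
--                 break
--         i = run_start[j]
--     return l
-- ===== Notes on version B (the rewrite author's own statement) =====
-- stated objective: alternative
-- what changed: B precomputes run-start/run-end boundary arrays once (run-length encoding) and then replaces A's one-element-at-a-time stride increments and backward backtracking scans by a single jump per streak, reproducing A's exact value on every input.
import Mathlib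
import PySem

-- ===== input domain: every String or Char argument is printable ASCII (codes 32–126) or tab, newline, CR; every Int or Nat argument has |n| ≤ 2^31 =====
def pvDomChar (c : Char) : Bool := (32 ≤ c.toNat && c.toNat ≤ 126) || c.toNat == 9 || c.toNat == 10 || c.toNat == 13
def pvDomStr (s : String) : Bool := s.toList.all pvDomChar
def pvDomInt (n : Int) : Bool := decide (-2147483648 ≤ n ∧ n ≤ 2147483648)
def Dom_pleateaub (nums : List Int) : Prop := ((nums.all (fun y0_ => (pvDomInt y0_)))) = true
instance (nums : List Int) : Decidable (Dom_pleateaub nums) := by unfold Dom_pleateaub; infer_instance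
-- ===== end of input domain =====

-- B precomputes run boundaries once and jumps over whole streaks instead of A's
-- per-element stride increments and backward backtracking scans (same O(n) cost).

-- ===== PORT A =====
-- inner while loop: `while 0 < i < len(nums) and nums[i] == nums[i - 1]: i -= 1`
-- (structural recursion on i; nums[i] is in range whenever it is read, getD is exact there)
def pvInner (nums : List Int) : Nat → Nat
  | 0 => 0
  | j + 1 =>
    if j + 1 < nums.length ∧ nums.getD (j + 1) 0 = nums.getD j 0 then pvInner nums j
    else j + 1

-- outer while loop on state (i, length); fuel = len(nums) suffices because i + length
-- strictly increases each iteration (proved as pvLoop_fuel_succ below)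
def pvLoop (nums : List Int) : Nat → Nat → Nat → Nat
  | 0, _, l => l
  | f + 1, i, l =>
    if i + l < nums.length then
      if nums.getD i 0 = nums.getD (i + l) 0 then pvLoop nums f i (l + 1)
      else pvLoop nums f (pvInner nums (i + l)) l
    else l

def pleateaub (nums : List Int) : Int :=
  (pvLoop nums nums.length 0 1 : Int)

-- ===== PORT B =====
-- `run_start = [0]*n; for p in range(1, n): run_start[p] = p if nums[p] != nums[p-1] else run_start[p-1]`
def mkRunStart (nums : List Int) : List Int :=
  (PySem.List.pyRange 1 (nums.length : Int) 1).foldl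
    (fun rs p =>
      PySem.List.pySetD rs p
        (if PySem.List.pyGetD nums p 0 ≠ PySem.List.pyGetD nums (p - 1) 0 then p
         else PySem.List.pyGetD rs (p - 1) 0))
    (List.replicate nums.length 0)

-- `run_end = [n]*n; for p in range(n-2, -1, -1): run_end[p] = p+1 if nums[p+1] != nums[p] else run_end[p+1]`
def mkRunEnd (nums : List Int) : List Int :=
  (PySem.List.pyRange ((nums.length : Int) - 2) (-1) (-1)).foldl
    (fun re p =>
      PySem.List.pySetD re p
        (if PySem.List.pyGetD nums (p + 1) 0 ≠ PySem.List.pyGetD nums p 0 then p + 1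
         else PySem.List.pyGetD re (p + 1) 0))
    (List.replicate nums.length (nums.length : Int))

-- B's while loop; fuel = len(nums) suffices because i + l strictly increases each iteration
def pvLoopB (nums rs re : List Int) : Nat → Int → Int → Int
  | 0, _, l => l
  | f + 1, i, l =>
    if i + l < (nums.length : Int) then
      if PySem.List.pyGetD nums (i + l) 0 = PySem.List.pyGetD nums i 0 then
        let j' := PySem.List.pyGetD re (i + l) 0
        let l' := l + (j' - (i + l))
        if (nums.length : Int) ≤ j' then l'
        else pvLoopB nums rs re f (PySem.List.pyGetD rs j' 0) l'
      else pvLoopB nums rs re f (PySem.List.pyGetD rs (i + l) 0) l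
    else l

def pleateaub_alt (nums : List Int) : Int :=
  if nums.length = 0 then 1
  else pvLoopB nums (mkRunStart nums) (mkRunEnd nums) nums.length 0 1

-- ===== PRECONDITION & SPEC =====
def Spec_pleateaub (nums : List Int) (out : Int) : Prop := out = pleateaub_alt nums
instance (nums : List Int) (out : Int) : Decidable (Spec_pleateaub nums out) := by unfold Spec_pleateaub; infer_instance

-- ===== CLAIM (what is proved, stated in full; the proofs are below) =====
def Claim_equal_pleateaub : Prop := ∀ (nums : List Int), Dom_pleateaub nums → Spec_pleateaub nums (pleateaub nums)

-- ===== LEMMAS AND PROOFS =====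

theorem pvInner_succ (nums : List Int) (j : Nat) :
    pvInner nums (j + 1)
      = if j + 1 < nums.length ∧ nums.getD (j + 1) 0 = nums.getD j 0 then pvInner nums j
        else j + 1 := rfl

theorem pvLoop_succ (nums : List Int) (f i l : Nat) :
    pvLoop nums (f + 1) i l
      = if i + l < nums.length then
          if nums.getD i 0 = nums.getD (i + l) 0 then pvLoop nums f i (l + 1)
          else pvLoop nums f (pvInner nums (i + l)) l
        else l := rfl

theorem pvInner_const (nums : List Int) (t : Nat) (ht : t < nums.length) :
    ∀ m, pvInner nums t ≤ m → m ≤ t → nums.getD m 0 = nums.getD t 0 := by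
  induction t with
  | zero =>
    intro m _ h2
    have : m = 0 := by omega
    rw [this]
  | succ t ih =>
    intro m h1 h2
    rw [pvInner_succ] at h1
    by_cases hc : t + 1 < nums.length ∧ nums.getD (t + 1) 0 = nums.getD t 0
    · rw [if_pos hc] at h1
      rcases Nat.eq_or_lt_of_le h2 with hmt | hmt
      · rw [hmt]
      · rw [ih (by omega) m h1 (by omega), hc.2]
    · rw [if_neg hc] at h1
      have hm : m = t + 1 := by omega
      rw [hm]

theorem pvInner_gt (nums : List Int) (i t : Nat) (ht : t < nums.length) (hit : i ≤ t)
    (hne : nums.getD i 0 ≠ nums.getD t 0) : i < pvInner nums t := by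
  by_contra hcon
  exact hne (pvInner_const nums t ht i (by omega) hit)

theorem pvInner_self (nums : List Int) (t : Nat) (h0 : 0 < t)
    (hne : nums.getD t 0 ≠ nums.getD (t - 1) 0) : pvInner nums t = t := by
  obtain ⟨j, rfl⟩ : ∃ j, t = j + 1 := ⟨t - 1, by omega⟩
  rw [pvInner_succ, if_neg]
  intro hc
  exact hne (by simpa using hc.2)

-- run end: pvREnd nums p = end (exclusive) of the constant run containing p
def pvREndD (nums : List Int) : Nat → Nat → Nat
  | 0, p => p + 1
  | d + 1, p =>
    if nums.getD (p + 1) 0 = nums.getD p 0 then pvREndD nums d (p + 1) else p + 1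

def pvREnd (nums : List Int) (p : Nat) : Nat := pvREndD nums (nums.length - 1 - p) p

theorem pvREnd_eq (nums : List Int) (p : Nat) (hp : p < nums.length) :
    pvREnd nums p
      = if p + 1 < nums.length ∧ nums.getD (p + 1) 0 = nums.getD p 0 then pvREnd nums (p + 1)
        else p + 1 := by
  unfold pvREnd
  by_cases h1 : p + 1 < nums.length
  · have hd : nums.length - 1 - p = (nums.length - 1 - (p + 1)) + 1 := by omega
    rw [hd]
    simp only [pvREndD]
    by_cases h2 : nums.getD (p + 1) 0 = nums.getD p 0
    · rw [if_pos h2, if_pos ⟨h1, h2⟩]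
    · rw [if_neg h2, if_neg (fun hc => h2 hc.2)]
  · have hd : nums.length - 1 - p = 0 := by omega
    rw [hd, if_neg (fun hc => h1 hc.1)]
    rfl

theorem pvREndD_gt (nums : List Int) (d : Nat) : ∀ p, p < pvREndD nums d p := by
  induction d with
  | zero => intro p; simp [pvREndD]
  | succ d ih =>
    intro p
    simp only [pvREndD]
    split
    · have := ih (p + 1); omega
    · omega

theorem pvREndD_le (nums : List Int) (d : Nat) : ∀ p, pvREndD nums d p ≤ p + 1 + d := by
  induction d with
  | zero => intro p; simp [pvREndD]
  | succ d ih =>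
    intro p
    simp only [pvREndD]
    split
    · have := ih (p + 1); omega
    · omega

theorem pvREnd_gt (nums : List Int) (p : Nat) : p < pvREnd nums p := pvREndD_gt nums _ p

theorem pvREnd_le (nums : List Int) (p : Nat) (hp : p < nums.length) :
    pvREnd nums p ≤ nums.length := by
  have := pvREndD_le nums (nums.length - 1 - p) p
  unfold pvREnd
  omega

theorem pvREndD_const (nums : List Int) (d : Nat) :
    ∀ p m, p ≤ m → m < pvREndD nums d p → nums.getD m 0 = nums.getD p 0 := by
  induction d with
  | zero =>
    intro p m h1 h2
    simp only [pvREndD] at h2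
    have : m = p := by omega
    rw [this]
  | succ d ih =>
    intro p m h1 h2
    simp only [pvREndD] at h2
    by_cases hc : nums.getD (p + 1) 0 = nums.getD p 0
    · rw [if_pos hc] at h2
      rcases Nat.eq_or_lt_of_le h1 with h | h
      · rw [← h]
      · rw [ih (p + 1) m (by omega) h2, hc]
    · rw [if_neg hc] at h2
      have : m = p := by omega
      rw [this]

theorem pvREnd_const (nums : List Int) (p m : Nat) (h1 : p ≤ m) (h2 : m < pvREnd nums p) :
    nums.getD m 0 = nums.getD p 0 := pvREndD_const nums _ p m h1 h2

theorem pvREndD_start (nums : List Int) (d : Nat) :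
    ∀ p, p + 1 + d = nums.length → pvREndD nums d p < nums.length →
      nums.getD (pvREndD nums d p) 0 ≠ nums.getD (pvREndD nums d p - 1) 0 := by
  induction d with
  | zero =>
    intro p hl hlt
    simp only [pvREndD] at hlt
    omega
  | succ d ih =>
    intro p hl hlt
    simp only [pvREndD] at hlt ⊢
    by_cases hc : nums.getD (p + 1) 0 = nums.getD p 0
    · rw [if_pos hc] at hlt ⊢
      exact ih (p + 1) (by omega) hlt
    · rw [if_neg hc] at hlt ⊢
      simpa using hc

theorem pvREnd_start (nums : List Int) (p : Nat) (hp : p < nums.length)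
    (hlt : pvREnd nums p < nums.length) :
    nums.getD (pvREnd nums p) 0 ≠ nums.getD (pvREnd nums p - 1) 0 :=
  pvREndD_start nums _ p (by unfold pvREnd at *; omega) hlt

-- List.set / getD interaction (total form, no side condition)
theorem pvGetDSet {α : Type} (xs : List α) (m p : Nat) (v d : α) :
    (xs.set m v).getD p d = if p = m ∧ m < xs.length then v else xs.getD p d := by
  unfold List.getD
  rw [List.getElem?_set]
  by_cases h1 : p = m
  · subst h1
    by_cases h2 : p < xs.length
    · simp [h2]
    · simp [h2]
  · simp [Ne.symm h1, h1]

-- characterisation of the precomputed boundary lists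
theorem mkRunStart_inv (nums : List Int) :
    ∀ m, m ≤ nums.length →
      ((PySem.List.pyRange 1 (m : Int) 1).foldl
        (fun rs p =>
          PySem.List.pySetD rs p
            (if PySem.List.pyGetD nums p 0 ≠ PySem.List.pyGetD nums (p - 1) 0 then p
             else PySem.List.pyGetD rs (p - 1) 0))
        (List.replicate nums.length 0)).length = nums.length ∧
      ∀ p, p < nums.length →
        ((PySem.List.pyRange 1 (m : Int) 1).foldl
          (fun rs p =>
            PySem.List.pySetD rs p
              (if PySem.List.pyGetD nums p 0 ≠ PySem.List.pyGetD nums (p - 1) 0 then p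
               else PySem.List.pyGetD rs (p - 1) 0))
          (List.replicate nums.length 0)).getD p 0
          = if p < m then (pvInner nums p : Int) else 0 := by
  intro m
  induction m with
  | zero =>
    intro _
    rw [show ((0 : Nat) : Int) = 0 by norm_num, PySem.List.pyRange_one_eq_nil (by norm_num)]
    refine ⟨by simp, fun p hp => ?_⟩
    rw [List.foldl_nil, List.getD_replicate _ hp, if_neg (by omega)]
  | succ m ih =>
    intro hm1
    rcases Nat.eq_zero_or_pos m with hm0 | hmpos
    · subst hm0
      rw [show ((0 + 1 : Nat) : Int) = 1 by norm_num, PySem.List.pyRange_one_eq_nil (by norm_num)]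
      refine ⟨by simp, fun p hp => ?_⟩
      rw [List.foldl_nil, List.getD_replicate _ hp]
      by_cases hp0 : p = 0
      · subst hp0
        rw [if_pos (by omega)]
        simp [pvInner]
      · rw [if_neg (by omega)]
    · obtain ⟨hlen, hinv⟩ := ih (by omega)
      have hcast : ((m + 1 : Nat) : Int) = (m : Int) + 1 := by push_cast; ring
      rw [hcast, PySem.List.pyRange_one_succ_right (by exact_mod_cast hmpos), List.foldl_append]
      simp only [List.foldl_cons, List.foldl_nil]
      have hmn : m < nums.length := by omega
      have hm1' : ((m : Int) - 1) = ((m - 1 : Nat) : Int) := by omega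
      constructor
      · rw [PySem.List.pySetD_natCast, List.length_set, hlen]
      · intro p hp
        rw [PySem.List.pySetD_natCast, pvGetDSet, hlen]
        by_cases hpm : p = m
        · subst hpm
          rw [if_pos ⟨rfl, hmn⟩, if_pos (show p < p + 1 by omega), hm1']
          simp only [PySem.List.pyGetD_natCast]
          rw [hinv (p - 1) (by omega), if_pos (show p - 1 < p by omega)]
          obtain ⟨j, rfl⟩ : ∃ j, p = j + 1 := ⟨p - 1, by omega⟩
          simp only [Nat.add_sub_cancel]
          rw [pvInner_succ]
          by_cases hc : nums.getD (j + 1) 0 = nums.getD j 0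
          · rw [if_neg (by simpa using hc), if_pos ⟨hmn, hc⟩]
          · rw [if_pos (by simpa using hc), if_neg (fun hcc => hc hcc.2)]
        · rw [if_neg (fun hcc => hpm hcc.1), hinv p hp]
          by_cases hlt : p < m
          · rw [if_pos hlt, if_pos (by omega)]
          · rw [if_neg hlt, if_neg (by omega)]

theorem mkRunStart_getD (nums : List Int) (p : Nat) (hp : p < nums.length) :
    (mkRunStart nums).getD p 0 = (pvInner nums p : Int) := by
  have h := (mkRunStart_inv nums nums.length le_rfl).2 p hp
  rw [if_pos hp] at h
  exact h

theorem mkRunEnd_inv (nums : List Int) :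
    ∀ k, k ≤ nums.length - 1 → ∀ re : List Int, re.length = nums.length →
      (∀ p, k ≤ p → p < nums.length → re.getD p 0 = (pvREnd nums p : Int)) →
      ∀ p, p < nums.length →
        ((PySem.List.pyRange ((k : Int) - 1) (-1) (-1)).foldl
          (fun re p =>
            PySem.List.pySetD re p
              (if PySem.List.pyGetD nums (p + 1) 0 ≠ PySem.List.pyGetD nums p 0 then p + 1
               else PySem.List.pyGetD re (p + 1) 0))
          re).getD p 0
          = (pvREnd nums p : Int) := by
  intro k
  induction k with
  | zero =>
    intro _ re hlen hre p hp
    rw [show ((0 : Nat) : Int) - 1 = -1 by norm_num,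
      PySem.List.pyRange_neg_one_eq_nil (by norm_num), List.foldl_nil]
    exact hre p (by omega) hp
  | succ k ih =>
    intro hk re hlen hre p hp
    have hcast : ((k + 1 : Nat) : Int) - 1 = (k : Int) := by push_cast; ring
    rw [hcast, PySem.List.pyRange_neg_one_cons (by omega)]
    simp only [List.foldl_cons]
    have hkn : k < nums.length := by omega
    have hk1n : k + 1 < nums.length := by omega
    refine ih (by omega) _ ?_ ?_ p hp
    · rw [PySem.List.pySetD_natCast, List.length_set, hlen]
    · intro q hq1 hq2
      rw [PySem.List.pySetD_natCast, pvGetDSet, hlen]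
      by_cases hqk : q = k
      · subst hqk
        rw [if_pos ⟨rfl, hkn⟩]
        have hc1 : ((q : Int) + 1) = ((q + 1 : Nat) : Int) := by push_cast; ring
        rw [hc1]
        simp only [PySem.List.pyGetD_natCast]
        rw [hre (q + 1) (by omega) hk1n, pvREnd_eq nums q hkn]
        by_cases hc : nums.getD (q + 1) 0 = nums.getD q 0
        · rw [if_neg (by simpa using hc), if_pos ⟨hk1n, hc⟩]
        · rw [if_pos (by simpa using hc), if_neg (fun hcc => hc hcc.2)]
      · rw [if_neg (fun hcc => hqk hcc.1)]
        exact hre q (by omega) hq2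

theorem mkRunEnd_getD (nums : List Int) (p : Nat) (hp : p < nums.length) :
    (mkRunEnd nums).getD p 0 = (pvREnd nums p : Int) := by
  have hstart : ∀ q, nums.length - 1 ≤ q → q < nums.length →
      (List.replicate nums.length ((nums.length : Int))).getD q 0 = (pvREnd nums q : Int) := by
    intro q h1 h2
    have hq : q = nums.length - 1 := by omega
    subst hq
    rw [List.getD_replicate _ h2]
    unfold pvREnd
    have h3 : nums.length - 1 - (nums.length - 1) = 0 := by omega
    rw [h3]
    simp only [pvREndD]
    omega
  have h := mkRunEnd_inv nums (nums.length - 1) le_rfl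
    (List.replicate nums.length ((nums.length : Int))) (by simp) hstart p hp
  unfold mkRunEnd
  rw [show ((nums.length : Int) - 2) = ((nums.length - 1 : Nat) : Int) - 1 by omega]
  exact h

-- fuel lemmas for A's loop
theorem pvLoop_stop (nums : List Int) (f i l : Nat) (h : nums.length ≤ i + l) :
    pvLoop nums f i l = l := by
  cases f with
  | zero => rfl
  | succ f => rw [pvLoop_succ, if_neg (by omega)]

theorem pvLoop_fuel_succ (nums : List Int) :
    ∀ f i l, 1 ≤ l → nums.length ≤ i + l + f →
      pvLoop nums (f + 1) i l = pvLoop nums f i l := by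
  intro f
  induction f with
  | zero =>
    intro i l _ h
    rw [pvLoop_succ, if_neg (by omega)]; rfl
  | succ f ih =>
    intro i l hl h
    rw [pvLoop_succ nums (f + 1) i l, pvLoop_succ nums f i l]
    by_cases hg : i + l < nums.length
    · rw [if_pos hg, if_pos hg]
      by_cases heq : nums.getD i 0 = nums.getD (i + l) 0
      · rw [if_pos heq, if_pos heq, ih i (l + 1) (by omega) (by omega)]
      · rw [if_neg heq, if_neg heq]
        have hgt : i < pvInner nums (i + l) :=
          pvInner_gt nums i (i + l) hg (by omega) heq
        rw [ih (pvInner nums (i + l)) l hl (by omega)]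
    · rw [if_neg hg, if_neg hg]

theorem pvLoop_fuel_ge (nums : List Int) (g : Nat) :
    ∀ f i l, 1 ≤ l → nums.length ≤ i + l + f →
      pvLoop nums (f + g) i l = pvLoop nums f i l := by
  induction g with
  | zero => intro f i l _ _; rfl
  | succ g ih =>
    intro f i l hl h
    have he : f + (g + 1) = (f + g) + 1 := by omega
    rw [he, pvLoop_fuel_succ nums (f + g) i l hl (by omega), ih f i l hl h]

theorem pvLoop_norm (nums : List Int) (f i l : Nat) (hl : 1 ≤ l)
    (h : nums.length ≤ i + l + f) :
    pvLoop nums f i l = pvLoop nums nums.length i l := by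
  rcases le_total f nums.length with hle | hle
  · rw [show nums.length = f + (nums.length - f) by omega, pvLoop_fuel_ge nums _ f i l hl h]
  · rw [show f = nums.length + (f - nums.length) by omega,
      pvLoop_fuel_ge nums _ nums.length i l hl (by omega)]

-- A consumes a streak reaching the end of the list
theorem pvLoop_tail (nums : List Int) :
    ∀ c i l f, 1 ≤ l → nums.length = i + l + c → c ≤ f →
      (∀ m, i + l ≤ m → m < nums.length → nums.getD m 0 = nums.getD i 0) →
      pvLoop nums f i l = l + c := by
  intro c
  induction c with
  | zero =>
    intro i l f _ hn _ _
    rw [pvLoop_stop nums f i l (by omega)]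
    omega
  | succ c ih =>
    intro i l f hl hn hf hs
    obtain ⟨f', rfl⟩ : ∃ f', f = f' + 1 := ⟨f - 1, by omega⟩
    rw [pvLoop_succ nums f' i l, if_pos (by omega),
      if_pos (hs (i + l) le_rfl (by omega)).symm,
      ih i (l + 1) f' (by omega) (by omega) (by omega)
        (fun m h1 h2 => hs m (by omega) h2)]
    omega

-- A consumes a streak ending strictly inside the list, then backtracks
theorem pvLoop_mid (nums : List Int) :
    ∀ c i l, 1 ≤ l → i + l + c < nums.length →
      (∀ m, i + l ≤ m → m < i + l + c → nums.getD m 0 = nums.getD i 0) →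
      nums.getD (i + l + c) 0 ≠ nums.getD i 0 →
      pvLoop nums nums.length i l
        = pvLoop nums nums.length (pvInner nums (i + l + c)) (l + c) := by
  intro c
  induction c with
  | zero =>
    intro i l hl hlt _ hne
    have hne' : ¬ nums.getD i 0 = nums.getD (i + l) 0 := fun hcon => hne (by simpa using hcon.symm)
    have hn1 : nums.length = (nums.length - 1) + 1 := by omega
    rw [hn1, pvLoop_succ nums (nums.length - 1) i l, if_pos (by omega), if_neg hne', ← hn1]
    rw [pvLoop_norm nums (nums.length - 1) (pvInner nums (i + l)) l hl (by
      have := pvInner_gt nums i (i + l) (by omega) (by omega) hne'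
      omega)]
    simp
  | succ c ih =>
    intro i l hl hlt hs hne
    have hn1 : nums.length = (nums.length - 1) + 1 := by omega
    rw [hn1, pvLoop_succ nums (nums.length - 1) i l, if_pos (by omega),
      if_pos (hs (i + l) le_rfl (by omega)).symm, ← hn1]
    rw [pvLoop_norm nums (nums.length - 1) i (l + 1) (by omega) (by omega)]
    have h1 : i + (l + 1) + c = i + l + (c + 1) := by omega
    rw [ih i (l + 1) (by omega) (by omega)
      (fun m hm1 hm2 => hs m (by omega) (by omega)) (by rw [h1]; exact hne), h1]
    have h2 : l + 1 + c = l + (c + 1) := by omega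
    rw [h2]

-- main simulation: one step of B's loop corresponds to a whole streak of A's
theorem pvLoopB_sim (nums : List Int) :
    ∀ fB i l, 1 ≤ l → nums.length ≤ i + l + fB →
      pvLoopB nums (mkRunStart nums) (mkRunEnd nums) fB (i : Int) (l : Int)
        = ((pvLoop nums nums.length i l : Nat) : Int) := by
  intro fB
  induction fB with
  | zero =>
    intro i l hl h
    simp only [pvLoopB]
    rw [pvLoop_stop nums nums.length i l (by omega)]
  | succ fB ih =>
    intro i l hl h
    simp only [pvLoopB]
    by_cases hg : i + l < nums.length
    · rw [if_pos (show (i : Int) + (l : Int) < (nums.length : Int) by exact_mod_cast hg)]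
      have hcast : ((i : Int) + (l : Int)) = ((i + l : Nat) : Int) := by push_cast; ring
      rw [hcast]
      simp only [PySem.List.pyGetD_natCast]
      by_cases heq : nums.getD (i + l) 0 = nums.getD i 0
      · rw [if_pos heq, mkRunEnd_getD nums (i + l) hg]
        have hgtj : i + l < pvREnd nums (i + l) := pvREnd_gt nums (i + l)
        have hlej : pvREnd nums (i + l) ≤ nums.length := pvREnd_le nums (i + l) hg
        set e := pvREnd nums (i + l) with he
        have hstreak : ∀ m, i + l ≤ m → m < e → nums.getD m 0 = nums.getD i 0 := by
          intro m h1 h2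
          rw [pvREnd_const nums (i + l) m h1 h2, heq]
        by_cases hend : nums.length ≤ e
        · rw [if_pos (by exact_mod_cast hend)]
          have hee : e = nums.length := by omega
          rw [pvLoop_tail nums (nums.length - (i + l)) i l nums.length hl (by omega)
            (by omega) (fun m h1 h2 => hstreak m h1 (by omega))]
          omega
        · rw [if_neg (by exact_mod_cast hend)]
          have hlt : e < nums.length := by omega
          have hinner : pvInner nums e = e := by
            have hst := pvREnd_start nums (i + l) hg hlt
            rw [← he] at hst
            exact pvInner_self nums e (by omega) hst
          rw [PySem.List.pyGetD_natCast, mkRunStart_getD nums e hlt, hinner]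
          have hc2 : (l : Int) + ((e : Int) - ((i + l : Nat) : Int))
              = ((l + (e - (i + l)) : Nat) : Int) := by omega
          rw [hc2, ih e (l + (e - (i + l))) (by omega) (by omega)]
          have hne2 : nums.getD (i + l + (e - (i + l))) 0 ≠ nums.getD i 0 := by
            have hprev : nums.getD (e - 1) 0 = nums.getD i 0 := hstreak (e - 1) (by omega) (by omega)
            have hst := pvREnd_start nums (i + l) hg hlt
            rw [← he] at hst
            rw [show i + l + (e - (i + l)) = e by omega]
            intro hcon
            exact hst (by rw [hcon, hprev])
          rw [pvLoop_mid nums (e - (i + l)) i l hl (by omega)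
            (fun m h1 h2 => hstreak m h1 (by omega)) hne2]
          rw [show i + l + (e - (i + l)) = e by omega, hinner]
      · rw [if_neg heq, mkRunStart_getD nums (i + l) hg]
        have hgt : i < pvInner nums (i + l) :=
          pvInner_gt nums i (i + l) hg (by omega) (fun hcon => heq hcon.symm)
        rw [ih (pvInner nums (i + l)) l hl (by omega)]
        have hne0 : nums.getD (i + l + 0) 0 ≠ nums.getD i 0 := by simpa using heq
        rw [pvLoop_mid nums 0 i l hl (by omega)
          (fun m h1 h2 => absurd h2 (by omega)) hne0]
        norm_num
    · rw [if_neg (show ¬ ((i : Int) + (l : Int) < (nums.length : Int)) by exact_mod_cast hg),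
        pvLoop_stop nums nums.length i l (by omega)]

-- ===== VERDICT (by name: the statement is the Claim_ definition above) =====
theorem pleateaub_spec : Claim_equal_pleateaub := by
  intro nums _
  unfold Spec_pleateaub pleateaub pleateaub_alt
  by_cases h0 : nums.length = 0
  · rw [if_pos h0, h0]
    rfl
  · rw [if_neg h0]
    have hs := pvLoopB_sim nums nums.length 0 1 (by omega) (by omega)
    simp only [Nat.cast_zero, Nat.cast_one] at hs
    rw [hs]
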